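-- pv_equiv track=rewrite | github.com/buildingwheels/ShallowGuess | training_scripts/compress.py | compress_line
-- ===== SOURCE A (Python) =====
-- def compress_line(line):
--     parts = line.strip().split(',')
--     compressed = []
--     count = 0
--
--     for part in parts[:-1]:
--         if part == '0':
--             count += 1
--         else:
--             if count > 0:
--                 compressed.append(str(count))
--                 count = 0
--             compressed.append('X')
--
--     if count > 0:
--         compressed.append(str(count))
--     compressed.append(parts[-1])
--
--     return ','.join(compressed)
-- ===== SOURCE B (Python) =====
-- def compress_line(line):
--     parts = line.strip().split(',')
--     body, last = parts[:-1], parts[-1]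
--     out = []
--     i = 0
--     n = len(body)
--     while i < n:
--         if body[i] == '0':
--             j = i
--             while j < n and body[j] == '0':
--                 j += 1
--             out.append(str(j - i))
--             i = j
--         else:
--             out.append('X')
--             i += 1
--     out.append(last)
--     return ','.join(out)
-- ===== Notes on version B (the rewrite author's own statement) =====
-- stated objective: alternative
-- what changed: A keeps a pending zero-counter that is flushed when a non-zero field or the end of the line is reached; B instead scans each zero run with a two-pointer inner loop (emitting the run length at once) and appends one marker per non-zero field, with no carried counter or flush logic.
import Mathlib
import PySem

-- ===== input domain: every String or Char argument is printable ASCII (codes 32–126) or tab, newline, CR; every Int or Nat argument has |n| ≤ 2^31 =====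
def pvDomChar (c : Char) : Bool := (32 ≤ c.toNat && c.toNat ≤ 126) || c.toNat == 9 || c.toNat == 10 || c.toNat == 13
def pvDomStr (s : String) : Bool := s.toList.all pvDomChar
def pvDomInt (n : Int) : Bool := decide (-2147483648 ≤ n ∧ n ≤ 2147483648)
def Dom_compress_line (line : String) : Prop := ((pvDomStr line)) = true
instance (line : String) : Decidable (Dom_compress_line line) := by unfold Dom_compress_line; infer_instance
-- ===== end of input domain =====

-- B replaces A's pending-counter-with-flush accumulator by a two-pointer run scan
-- (scan ahead over each zero run and emit its length at once); objective: alternative.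

-- ===== PORT A =====
-- A's loop body: state = (compressed, count)
def stepA (st : List String × Int) (part : String) : List String × Int :=
  if part = "0" then (st.1, st.2 + 1)
  else ((if st.2 > 0 then st.1 ++ [PySem.Int.toStr st.2] else st.1) ++ ["X"], 0)

-- A's trailing 'if count > 0: compressed.append(str(count))'
def flushA (st : List String × Int) : List String :=
  if st.2 > 0 then st.1 ++ [PySem.Int.toStr st.2] else st.1

def compress_line (line : String) : String :=
  let parts := (PySem.Str.split? (PySem.Str.strip line) ",").getD []
  let st := (PySem.List.slice parts none (some (-1))).foldl stepA ([], 0)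
  -- parts from str.split is never empty, so parts[-1] never raises; getD "" is unreachable
  let compressed := flushA st ++ [(PySem.List.pyGet? parts (-1)).getD ""]
  PySem.Str.join "," compressed

-- ===== PORT B =====
-- B's while loop: at a '0' scan the whole run (inner 'while j < n and body[j] == "0"')
-- and emit str(j - i); takeWhile/dropWhile on the remainder is exactly that inner scan.
def altRuns : List String → List String
  | [] => []
  | p :: rest =>
    if p = "0" then
      PySem.Int.toStr ((1 + (rest.takeWhile (fun q => q == "0")).length : Nat) : Int)
        :: altRuns (rest.dropWhile (fun q => q == "0"))
    else
      "X" :: altRuns rest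
termination_by l => l.length
decreasing_by
  · have := List.length_dropWhile_le (fun q => q == "0") rest
    simp only [List.length_cons]; omega
  · simp only [List.length_cons]; omega

def compress_line_alt (line : String) : String :=
  let parts := (PySem.Str.split? (PySem.Str.strip line) ",").getD []
  let body := PySem.List.slice parts none (some (-1))
  let last := (PySem.List.pyGet? parts (-1)).getD ""
  PySem.Str.join "," (altRuns body ++ [last])

-- ===== PRECONDITION & SPEC =====
def Spec_compress_line (line : String) (out : String) : Prop := out = compress_line_alt line
instance (line : String) (out : String) : Decidable (Spec_compress_line line out) := by unfold Spec_compress_line; infer_instance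

-- ===== CLAIM (what is proved, stated in full; the proofs are below) =====
def Claim_equal_compress_line : Prop := ∀ (line : String), Dom_compress_line line → Spec_compress_line line (compress_line line)

-- ===== LEMMAS AND PROOFS =====

lemma takeWhile_zeros_cons (k : Nat) (p : String) (hp : p ≠ "0") (rest : List String) :
    (List.replicate k "0" ++ p :: rest).takeWhile (fun q => q == "0")
      = List.replicate k "0" := by
  induction k with
  | zero => simp [hp]
  | succ k ih => simp [List.replicate_succ, ih]

lemma dropWhile_zeros_cons (k : Nat) (p : String) (hp : p ≠ "0") (rest : List String) :
    (List.replicate k "0" ++ p :: rest).dropWhile (fun q => q == "0") = p :: rest := by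
  induction k with
  | zero => simp [hp]
  | succ k ih => simp [List.replicate_succ, ih]

lemma altRuns_replicate (k : Nat) :
    altRuns (List.replicate k "0")
      = if k = 0 then [] else [PySem.Int.toStr (k : Int)] := by
  cases k with
  | zero => simp [altRuns]
  | succ k =>
    rw [List.replicate_succ, altRuns]
    simp [altRuns, Nat.add_comm]

lemma altRuns_replicate_cons (k : Nat) (p : String) (hp : p ≠ "0") (rest : List String) :
    altRuns (List.replicate k "0" ++ p :: rest)
      = (if k = 0 then [] else [PySem.Int.toStr (k : Int)]) ++ "X" :: altRuns rest := by
  cases k with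
  | zero => simp [altRuns, hp]
  | succ k =>
    rw [List.replicate_succ, List.cons_append, altRuns]
    simp [takeWhile_zeros_cons k p hp rest, dropWhile_zeros_cons k p hp rest,
      altRuns, hp, Nat.add_comm]

lemma key (l : List String) (acc : List String) (n : Nat) :
    flushA (l.foldl stepA (acc, (n : Int)))
      = acc ++ altRuns (List.replicate n "0" ++ l) := by
  induction l generalizing acc n with
  | nil =>
    simp only [List.foldl_nil, List.append_nil, flushA, altRuns_replicate]
    by_cases h : n = 0
    · simp [h]
    · have hn : 0 < n := Nat.pos_of_ne_zero h
      simp [h, hn]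
  | cons p rest ih =>
    by_cases hp : p = "0"
    · subst hp
      rw [List.foldl_cons]
      have hstep : stepA (acc, (n : Int)) "0" = (acc, ((n + 1 : Nat) : Int)) := by
        simp [stepA]
      rw [hstep, ih acc (n + 1), List.replicate_succ']
      simp [List.append_assoc]
    · rw [List.foldl_cons]
      have hstep : stepA (acc, (n : Int)) p = (flushA (acc, (n : Int)) ++ ["X"], ((0 : Nat) : Int)) := by
        simp [stepA, flushA, hp]
      rw [hstep, ih (flushA (acc, (n : Int)) ++ ["X"]) 0,
        altRuns_replicate_cons n p hp rest]
      by_cases h : n = 0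
      · simp [h, flushA]
      · have hn : 0 < n := Nat.pos_of_ne_zero h
        simp [h, flushA, hn]

-- ===== VERDICT (by name: the statement is the Claim_ definition above) =====
theorem compress_line_spec : Claim_equal_compress_line := by
  intro line _
  unfold Spec_compress_line compress_line compress_line_alt
  have h := key (PySem.List.slice ((PySem.Str.split? (PySem.Str.strip line) ",").getD []) none (some (-1))) [] 0
  simp only [List.replicate_zero, List.nil_append, Nat.cast_zero] at h
  simp only [h]
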